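-- pv_equiv track=rewrite | github.com/dev-hans-programmer/data-structure-and-algorithms | dsa/basics/arrays/problems/easy/pythoncode/main.py | union_arr_optimal_2
-- ===== SOURCE A (Python) =====
-- def union_arr_optimal_2(nums1: list[int], nums2: list[int]):
--     i, j = 0, 0
--     n1, n2 = len(nums1), len(nums2)
--     union = []
--     while i < n1 and j < n2:
--         if nums1[i] < nums2[j]:
--             if len(union) == 0 or union[-1] != nums1[i]:
--                 union.append(nums1[i])
--             i += 1
--         else:
--             if len(union) == 0 or union[-1] != nums2[j]:
--                 union.append(nums2[j])
--             j += 1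
--     while i < n1:
--         if len(union) == 0 or union[-1] != nums1[i]:
--             union.append(nums1[i])
--         i += 1
--     while j < n2:
--         if len(union) == 0 or union[-1] != nums2[j]:
--             union.append(nums2[j])
--         j += 1
--     return union
-- ===== SOURCE B (Python) =====
-- def union_arr_optimal_2(nums1: list[int], nums2: list[int]):
--     # pass 1: plain two-pointer merge (same tie-break as A), duplicates kept
--     i, j = 0, 0
--     merged = []
--     while i < len(nums1) and j < len(nums2):
--         if nums1[i] < nums2[j]:
--             merged.append(nums1[i])
--             i += 1
--         else:
--             merged.append(nums2[j])
--             j += 1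
--     merged += nums1[i:]
--     merged += nums2[j:]
--     # pass 2: drop consecutive duplicates
--     union = []
--     for v in merged:
--         if not union or union[-1] != v:
--             union.append(v)
--     return union
-- ===== Notes on version B (the rewrite author's own statement) =====
-- stated objective: alternative
-- what changed: A's single fused merge-with-inline-dedup loop is split into two passes: a plain two-pointer merge that keeps duplicates (draining tails with slices), followed by a separate pass removing consecutive duplicates.
import Mathlib
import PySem

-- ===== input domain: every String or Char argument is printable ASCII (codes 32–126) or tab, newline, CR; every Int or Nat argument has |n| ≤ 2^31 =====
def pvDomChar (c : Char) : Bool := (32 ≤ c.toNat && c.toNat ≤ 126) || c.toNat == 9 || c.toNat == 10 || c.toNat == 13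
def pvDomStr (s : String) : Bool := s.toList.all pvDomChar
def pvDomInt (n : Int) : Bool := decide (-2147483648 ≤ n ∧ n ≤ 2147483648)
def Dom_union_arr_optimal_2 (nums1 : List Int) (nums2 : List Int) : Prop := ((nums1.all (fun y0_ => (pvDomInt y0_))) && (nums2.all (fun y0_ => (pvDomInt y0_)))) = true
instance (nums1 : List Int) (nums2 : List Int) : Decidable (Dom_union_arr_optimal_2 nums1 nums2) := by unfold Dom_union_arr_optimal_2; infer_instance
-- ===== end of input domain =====

-- B splits A's fused merge-with-inline-dedup loop into a plain two-pointer merge pass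
-- (duplicates kept, tails drained wholesale) followed by a separate consecutive-dedup pass.

-- ===== PORT A =====
-- `if len(union) == 0 or union[-1] != v: union.append(v)` (appears in all three loops of A)
def pvPush (acc : List Int) (v : Int) : List Int :=
  if acc = [] ∨ acc.getLast? ≠ some v then acc ++ [v] else acc

-- the second/third while loops of A: drain one list with the dedup check
def pvDrainA (xs : List Int) (acc : List Int) : List Int :=
  match xs with
  | [] => acc
  | x :: r => pvDrainA r (pvPush acc x)

-- the first while loop of A (runs while both pointers are in range), then the drains
def pvFusedA : List Int → List Int → List Int → List Int
  | x :: xs, y :: ys, acc =>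
      if x < y then pvFusedA xs (y :: ys) (pvPush acc x)
      else pvFusedA (x :: xs) ys (pvPush acc y)
  | xs, [], acc => pvDrainA xs acc
  | [], ys, acc => pvDrainA ys acc
  termination_by xs ys _ => xs.length + ys.length

def union_arr_optimal_2 (nums1 : List Int) (nums2 : List Int) : List Int :=
  pvFusedA nums1 nums2 []

-- ===== PORT B =====
-- pass 1 of B: two-pointer merge keeping duplicates; `merged += nums1[i:]` etc. are the base cases
def pvMergeB : List Int → List Int → List Int
  | x :: xs, y :: ys =>
      if x < y then x :: pvMergeB xs (y :: ys)
      else y :: pvMergeB (x :: xs) ys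
  | xs, [] => xs
  | [], ys => ys
  termination_by xs ys => xs.length + ys.length

-- pass 2 of B: `for v in merged: if not union or union[-1] != v: union.append(v)`
def union_arr_optimal_2_alt (nums1 : List Int) (nums2 : List Int) : List Int :=
  (pvMergeB nums1 nums2).foldl pvPush []

-- ===== PRECONDITION & SPEC =====
def Spec_union_arr_optimal_2 (nums1 : List Int) (nums2 : List Int) (out : List Int) : Prop := out = union_arr_optimal_2_alt nums1 nums2
instance (nums1 : List Int) (nums2 : List Int) (out : List Int) : Decidable (Spec_union_arr_optimal_2 nums1 nums2 out) := by unfold Spec_union_arr_optimal_2; infer_instance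

-- ===== CLAIM (what is proved, stated in full; the proofs are below) =====
def Claim_equal_union_arr_optimal_2 : Prop := ∀ (nums1 : List Int) (nums2 : List Int), Dom_union_arr_optimal_2 nums1 nums2 → Spec_union_arr_optimal_2 nums1 nums2 (union_arr_optimal_2 nums1 nums2)

-- ===== LEMMAS AND PROOFS =====

-- A's drain loops fold pvPush over the remaining list
theorem pvDrainA_eq_foldl (xs acc : List Int) : pvDrainA xs acc = xs.foldl pvPush acc := by
  induction xs generalizing acc with
  | nil => rfl
  | cons x r ih => simp [pvDrainA, List.foldl, ih]

-- A's fused loop equals folding the dedup step over B's merged-with-duplicates list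
theorem pvFusedA_eq_foldl_merge (xs ys acc : List Int) :
    pvFusedA xs ys acc = (pvMergeB xs ys).foldl pvPush acc := by
  fun_induction pvFusedA xs ys acc with
  | case1 x xs y ys acc h ih => simp [pvMergeB, h, ih]
  | case2 x xs y ys acc h ih => simp [pvMergeB, h, ih]
  | case3 xs acc =>
    cases xs with
    | nil => simp [pvMergeB, pvDrainA_eq_foldl]
    | cons x r => simp [pvMergeB, pvDrainA_eq_foldl]
  | case4 ys acc => simp [pvMergeB, pvDrainA_eq_foldl]

-- ===== VERDICT (by name: the statement is the Claim_ definition above) =====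
theorem union_arr_optimal_2_spec : Claim_equal_union_arr_optimal_2 := by
  intro nums1 nums2 _
  unfold Spec_union_arr_optimal_2 union_arr_optimal_2 union_arr_optimal_2_alt
  exact pvFusedA_eq_foldl_merge nums1 nums2 []
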